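-- pv_equiv track=rewrite | github.com/rekiemzi350-alt/Linguistic_Topology | compare_ancient.py | get_sumerian_len
-- ===== SOURCE A (Python) =====
-- def get_sumerian_len(n):
--     # Sumerian (Base 60, but we trace 0-100 using standard notation)
--     # 1: dis, 2: min, 3: es, 4: limmu, 5: ia, 6: as, 7: imin, 8: ussu, 9: ilimmu, 10: u
--     # 20: nis, 30: usu, 40: nimin, 50: ninnu, 60: gis
--
--     if n == 0: return 0 # Concept didn't exist in same way, return 0 length (stop)
--
--     units = ["", "dis", "min", "es", "limmu", "ia", "as", "imin", "ussu", "ilimmu"]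
--     tens = ["", "u", "nis", "usu", "nimin", "ninnu", "gis", "gis-u", "gis-nis", "gis-usu"] # 10, 20... 90 (approx)
--
--     if n < 10: return len(units[n])
--
--     if n < 60:
--         t = n // 10
--         u = n % 10
--         base = tens[t]
--         if u == 0: return len(base)
--         return len(base + units[u]) # e.g. u-dis
--
--     if n >= 60:
--         # 60 is 'gis'
--         # 61 is 'gis dis'
--         # 70 is 'gis u'
--         val = n - 60
--         base = "gis"
--         if val == 0: return len(base)
--         # recursive simple
--         return len(base) + get_sumerian_len(val)
-- ===== SOURCE B (Python) =====
-- # Closed form: 3 per 60-step plus a precomputed length table for the residue 0..59.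
-- _LEN = (0, 3, 3, 2, 5, 2, 2, 4, 4, 6, 1, 4, 4, 3, 6, 3, 3, 5, 5, 7,
--         3, 6, 6, 5, 8, 5, 5, 7, 7, 9, 3, 6, 6, 5, 8, 5, 5, 7, 7, 9,
--         5, 8, 8, 7, 10, 7, 7, 9, 9, 11, 5, 8, 8, 7, 10, 7, 7, 9, 9, 11)
--
-- def get_sumerian_len(n):
--     q, r = divmod(n, 60)
--     return 3 * q + _LEN[r]
-- ===== Notes on version B (the rewrite author's own statement) =====
-- stated objective: faster
-- what changed: Replaces A's per-60 recursion and string building with a closed form 3*(n//60) plus a precomputed 60-entry length table for n%60.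
-- outside the precondition, e.g. on get_sumerian_len(-3): A returns 4, B returns 6; on get_sumerian_len(-11): A raises IndexError, B returns 8
import Mathlib
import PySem

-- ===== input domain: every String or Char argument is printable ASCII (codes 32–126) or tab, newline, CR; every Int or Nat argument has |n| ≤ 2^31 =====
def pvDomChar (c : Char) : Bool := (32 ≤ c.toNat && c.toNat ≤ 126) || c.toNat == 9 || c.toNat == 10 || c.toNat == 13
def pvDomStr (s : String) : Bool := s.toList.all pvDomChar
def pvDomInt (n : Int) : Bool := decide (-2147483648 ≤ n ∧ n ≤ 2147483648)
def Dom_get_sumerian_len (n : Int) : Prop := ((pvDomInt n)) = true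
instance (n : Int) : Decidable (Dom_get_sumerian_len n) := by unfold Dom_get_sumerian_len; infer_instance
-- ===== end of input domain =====

-- ===== PORT A =====
-- B is the closed form 3*(n//60) + table[n%60]; A recurses in steps of 60.
def pvUnits : List String := ["", "dis", "min", "es", "limmu", "ia", "as", "imin", "ussu", "ilimmu"]
def pvTens : List String := ["", "u", "nis", "usu", "nimin", "ninnu", "gis", "gis-u", "gis-nis", "gis-usu"]

def get_sumerian_len (n : Int) : Int :=
  if n = 0 then 0
  else if n < 10 then
    PySem.Str.len (((PySem.List.pyGet? pvUnits n).getD ""))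
  else if n < 60 then
    let t := PySem.Int.floordiv n 10
    let u := PySem.Int.mod n 10
    let base := (PySem.List.pyGet? pvTens t).getD ""
    if u = 0 then PySem.Str.len base
    else PySem.Str.len (base ++ (PySem.List.pyGet? pvUnits u).getD "")
  else -- n ≥ 60 here (Python's final `if n >= 60` branch)
    let val := n - 60
    if val = 0 then PySem.Str.len "gis"
    else PySem.Str.len "gis" + get_sumerian_len val
termination_by n.toNat
decreasing_by
  simp_wf
  omega

-- ===== PORT B =====
def pvLenTable : List Int :=
  [0, 3, 3, 2, 5, 2, 2, 4, 4, 6, 1, 4, 4, 3, 6, 3, 3, 5, 5, 7,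
   3, 6, 6, 5, 8, 5, 5, 7, 7, 9, 3, 6, 6, 5, 8, 5, 5, 7, 7, 9,
   5, 8, 8, 7, 10, 7, 7, 9, 9, 11, 5, 8, 8, 7, 10, 7, 7, 9, 9, 11]

def get_sumerian_len_alt (n : Int) : Int :=
  let q := PySem.Int.floordiv n 60
  let r := PySem.Int.mod n 60
  3 * q + (PySem.List.pyGet? pvLenTable r).getD 0

-- ===== PRECONDITION & SPEC =====
-- Pre_ restricts to the natural domain n ≥ 0: on negative n the numeral length is
-- undefined and A's values there (n in -10..-1) are Python negative-index wraparound
-- artefacts (A raises IndexError for n ≤ -11).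
def Pre_get_sumerian_len (n : Int) : Prop := 0 ≤ n
instance (n : Int) : Decidable (Pre_get_sumerian_len n) := by unfold Pre_get_sumerian_len; infer_instance
def pvWitness_get_sumerian_len : Int := 61

def Spec_get_sumerian_len (n : Int) (out : Int) : Prop := out = get_sumerian_len_alt n
instance (n : Int) (out : Int) : Decidable (Spec_get_sumerian_len n out) := by unfold Spec_get_sumerian_len; infer_instance

-- ===== CLAIM (what is proved, stated in full; the proofs are below) =====
def Claim_equal_get_sumerian_len : Prop := ∀ (n : Int), Dom_get_sumerian_len n → Pre_get_sumerian_len n → Spec_get_sumerian_len n (get_sumerian_len n)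

-- ===== LEMMAS AND PROOFS =====

-- B satisfies the step-of-60 recurrence.
lemma alt_step (n : Int) (_h : 60 ≤ n) :
    get_sumerian_len_alt n = 3 + get_sumerian_len_alt (n - 60) := by
  have h60 : (0:Int) < 60 := by norm_num
  unfold get_sumerian_len_alt
  rw [PySem.Int.floordiv_eq_ediv_of_pos h60, PySem.Int.floordiv_eq_ediv_of_pos h60,
      PySem.Int.mod_eq_emod_of_pos h60, PySem.Int.mod_eq_emod_of_pos h60]
  have hq : n / 60 = (n - 60) / 60 + 1 := by omega
  have hr : n % 60 = (n - 60) % 60 := by omega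
  rw [hq, hr]
  ring

-- Base case: on 0 ≤ n < 60 the two ports agree (finite check).
lemma base_case (n : Int) (h0 : 0 ≤ n) (h60 : n < 60) :
    get_sumerian_len n = get_sumerian_len_alt n := by
  interval_cases n <;> (rw [get_sumerian_len.eq_def]; decide)

lemma agree (n : Int) (h0 : 0 ≤ n) : get_sumerian_len n = get_sumerian_len_alt n := by
  by_cases h : n < 60
  · exact base_case n h0 h
  · push Not at h
    have ih : get_sumerian_len (n - 60) = get_sumerian_len_alt (n - 60) :=
      agree (n - 60) (by omega)
    rw [alt_step n h, get_sumerian_len.eq_def]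
    have h1 : ¬ n = 0 := by omega
    have h2 : ¬ n < 10 := by omega
    have h3 : ¬ n < 60 := by omega
    simp only [h1, h2, h3, if_false]
    by_cases hv : n - 60 = 0
    · rw [if_pos hv, hv]
      decide
    · rw [if_neg hv, ih]
      have h3 : PySem.Str.len "gis" = 3 := by decide
      rw [h3]
termination_by n.toNat
decreasing_by
  simp_wf
  omega

-- ===== VERDICT (by name: the statement is the Claim_ definition above) =====
theorem get_sumerian_len_spec : Claim_equal_get_sumerian_len := by
  intro n _ hpre
  exact agree n hpre
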